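-- pv_equiv track=rewrite | github.com/ruben-arts/aoc2021 | src/day11.py | flash_octo
-- ===== SOURCE A (Python) =====
-- def get_coords_neighbor(x, y, grid_len):
--     # def in_grid(val):
--     #     if val < 0 or val > grid_len:
--     #         return False
--     #     else:
--     #         return True
--
--     return {(max(x - 1, 0), max(y - 1, 0)), (x, max(y - 1, 0)), (min(x + 1, grid_len), max(y - 1, 0)),
--             (min(x + 1, grid_len), y), (min(x + 1, grid_len), min(y + 1, grid_len)), (x, min(y + 1, grid_len)),
--             (max(x - 1, 0), min(y + 1, grid_len)), (max(x - 1, 0), y)}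
--
-- def flash_octo(grid, x, y, set_of_flashed):
--     flashes = 0
--     if grid[y][x] > 9 and (x, y) not in set_of_flashed:
--         set_of_flashed.add((x, y))
--         flashes += 1
--         grid[y][x] = 0
--         for neighbor in get_coords_neighbor(x, y, len(grid) - 1):
--             if neighbor not in set_of_flashed:
--                 grid[neighbor[1]][neighbor[0]] += 1
--                 flashes += flash_octo(grid, neighbor[0], neighbor[1], set_of_flashed)
--     return flashes
-- ===== SOURCE B (Python) =====
-- def get_coords_neighbor(x, y, grid_len):
--     return {(max(x - 1, 0), max(y - 1, 0)), (x, max(y - 1, 0)), (min(x + 1, grid_len), max(y - 1, 0)),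
--             (min(x + 1, grid_len), y), (min(x + 1, grid_len), min(y + 1, grid_len)), (x, min(y + 1, grid_len)),
--             (max(x - 1, 0), min(y + 1, grid_len)), (max(x - 1, 0), y)}
--
-- def flash_octo(grid, x, y, set_of_flashed):
--     # Iterative flood-fill: an explicit LIFO stack of pending neighbor agendas
--     # replaces the recursion (no call-stack growth on large flash regions).
--     count = 0
--     stack = []
--     if grid[y][x] > 9 and (x, y) not in set_of_flashed:
--         count, grid[y][x] = 1, 0
--         set_of_flashed.add((x, y))
--         stack.append(list(get_coords_neighbor(x, y, len(grid) - 1)))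
--     while stack:
--         if not stack[-1]:
--             stack.pop()
--             continue
--         cx, cy = stack[-1].pop(0)
--         if (cx, cy) not in set_of_flashed:
--             grid[cy][cx] += 1
--             if grid[cy][cx] > 9:
--                 count, grid[cy][cx] = count + 1, 0
--                 set_of_flashed.add((cx, cy))
--                 stack.append(list(get_coords_neighbor(cx, cy, len(grid) - 1)))
--     return count
-- ===== Notes on version B (the rewrite author's own statement) =====
-- stated objective: alternative
-- what changed: The recursive flood-fill is replaced by an iterative loop over an explicit stack of pending neighbor agendas (defunctionalized DFS), so B performs the same cell visits without growing the Python call stack and cannot hit RecursionError on large flash regions.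
-- outside the precondition, e.g. on flash_octo([[10, 1, 5], [1, 2]], 0, 0, set()): A returns 1, B returns 1; on flash_octo([[10, 1], [1, 1]], 0, 2, set()): A raises IndexError, B raises IndexError
import Mathlib
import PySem

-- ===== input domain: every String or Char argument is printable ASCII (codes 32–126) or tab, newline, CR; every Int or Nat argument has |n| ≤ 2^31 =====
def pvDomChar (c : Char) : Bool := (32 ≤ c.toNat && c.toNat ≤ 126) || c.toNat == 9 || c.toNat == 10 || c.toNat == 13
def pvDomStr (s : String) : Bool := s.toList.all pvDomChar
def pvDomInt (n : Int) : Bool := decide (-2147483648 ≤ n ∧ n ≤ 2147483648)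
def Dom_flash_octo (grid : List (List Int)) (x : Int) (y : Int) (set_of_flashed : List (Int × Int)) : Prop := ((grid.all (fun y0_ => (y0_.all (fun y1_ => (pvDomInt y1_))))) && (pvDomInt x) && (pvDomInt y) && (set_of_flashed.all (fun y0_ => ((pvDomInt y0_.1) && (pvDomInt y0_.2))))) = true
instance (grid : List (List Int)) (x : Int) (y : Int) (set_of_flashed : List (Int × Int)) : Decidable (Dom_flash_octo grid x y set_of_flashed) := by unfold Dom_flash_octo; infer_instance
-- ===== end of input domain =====

-- B replaces A's recursive flood-fill by an iterative loop over an explicit stack of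
-- pending neighbor agendas (same visit order, no call-stack growth).
-- Both Pythons mutate grid and set_of_flashed in place identically; the equivalence
-- proved here is about the RETURN value.
-- Python iterates the neighbor set in hash order, which PySem does not model; both
-- ports iterate it in first-occurrence construction order (`PySem.List.dedup`), and
-- the differential check validates the ports against the Pythons inside Pre_.

-- ===== PORT A =====
-- shared helper: list(get_coords_neighbor(x, y, grid_len)) in construction order
def pvNbrs (x y glen : Int) : List (Int × Int) :=
  PySem.List.dedup [(max (x-1) 0, max (y-1) 0), (x, max (y-1) 0), (min (x+1) glen, max (y-1) 0),
    (min (x+1) glen, y), (min (x+1) glen, min (y+1) glen), (x, min (y+1) glen),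
    (max (x-1) 0, min (y+1) glen), (max (x-1) 0, y)]

-- shared helper: grid[y][x] (total form; Pre_ keeps indices in range)
def pvCell (g : List (List Int)) (y x : Int) : Int :=
  PySem.List.pyGetD (PySem.List.pyGetD g y []) x 0

-- shared helper: grid[y][x] = v
def pvSetCell (g : List (List Int)) (y x : Int) (v : Int) : List (List Int) :=
  PySem.List.pySetD g y (PySem.List.pySetD (PySem.List.pyGetD g y []) x v)

mutual
-- A's recursion, with a fuel guard that merely makes the recursion total
-- (flash_octo calls it with provably sufficient fuel on Pre_ inputs)
def pvFlashA : Nat → List (List Int) → Int → Int → List (Int × Int) →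
    Option (Int × List (List Int) × List (Int × Int))
  | 0, _, _, _, _ => none
  | fuel+1, g, x, y, s =>
    if pvCell g y x > 9 && !(PySem.Set.contains s (x, y)) then
      pvLoopA fuel (pvNbrs x y ((g.length : Int) - 1)) 1 (pvSetCell g y x 0)
        (PySem.Set.add s (x, y))
    else some (0, g, s)
  termination_by fuel _ _ _ _ => (fuel, 0)

-- A's `for neighbor in …` loop
def pvLoopA : Nat → List (Int × Int) → Int → List (List Int) → List (Int × Int) →
    Option (Int × List (List Int) × List (Int × Int))
  | _, [], fl, g, s => some (fl, g, s)
  | fuel, c :: rest, fl, g, s =>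
    if !(PySem.Set.contains s c) then
      match pvFlashA fuel (pvSetCell g c.2 c.1 (pvCell g c.2 c.1 + 1)) c.1 c.2 s with
      | none => none
      | some (f2, g2, s2) => pvLoopA fuel rest (fl + f2) g2 s2
    else pvLoopA fuel rest fl g s
  termination_by fuel cells _ _ _ => (fuel, cells.length + 1)
end

def flash_octo (grid : List (List Int)) (x : Int) (y : Int) (set_of_flashed : List (Int × Int)) : Int :=
  match pvFlashA (grid.length * grid.length + 1) grid x y set_of_flashed with
  | some (fl, _, _) => fl
  | none => 0

-- ===== PORT B =====
-- B's while-loop over the explicit stack of agendas; fuel again only for totality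
def pvRunB : Nat → List (List (Int × Int)) → Int → List (List Int) → List (Int × Int) →
    Option (Int × List (List Int) × List (Int × Int))
  | _, [], fl, g, s => some (fl, g, s)
  | fuel, [] :: rest, fl, g, s => pvRunB fuel rest fl g s
  | fuel, (c :: agenda) :: rest, fl, g, s =>
    if !(PySem.Set.contains s c) then
      let g1 := pvSetCell g c.2 c.1 (pvCell g c.2 c.1 + 1)
      if pvCell g1 c.2 c.1 > 9 then
        match fuel with
        | 0 => none
        | fuel'+1 =>
          pvRunB fuel' (pvNbrs c.1 c.2 ((g1.length : Int) - 1) :: agenda :: rest)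
            (fl + 1) (pvSetCell g1 c.2 c.1 0) (PySem.Set.add s c)
      else pvRunB fuel (agenda :: rest) fl g1 s
    else pvRunB fuel (agenda :: rest) fl g s
  termination_by fuel stack _ _ _ => (fuel, (stack.map (fun a => a.length + 1)).sum)

def flash_octo_alt (grid : List (List Int)) (x : Int) (y : Int) (set_of_flashed : List (Int × Int)) : Int :=
  if pvCell grid y x > 9 && !(PySem.Set.contains set_of_flashed (x, y)) then
    match pvRunB (grid.length * grid.length + 1) [pvNbrs x y ((grid.length : Int) - 1)] 1
        (pvSetCell grid y x 0) (PySem.Set.add set_of_flashed (x, y)) with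
    | some (fl, _, _) => fl
    | none => 0
  else 0

-- ===== PRECONDITION & SPEC =====
-- Pre_ requires grid[y][x] to be a valid Python access, and, only when that cell
-- actually flashes, a nonempty square grid with nonnegative coordinates: on other
-- flashing inputs A either raises IndexError (ragged/short rows reached by the
-- flood) or, with negative coordinates, Python's index wraparound aliases a cell
-- under two names and A's value depends on the accidental hash iteration order of
-- the neighbor set.
def Pre_flash_octo (grid : List (List Int)) (x : Int) (y : Int) (set_of_flashed : List (Int × Int)) : Prop :=
  PySem.Raise.InRange grid.length y ∧
  PySem.Raise.InRange (PySem.List.pyGetD grid y []).length x ∧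
  (pvCell grid y x ≤ 9 ∨ (x, y) ∈ set_of_flashed ∨
    (1 ≤ grid.length ∧ (∀ row ∈ grid, row.length = grid.length) ∧ 0 ≤ x ∧ 0 ≤ y))
instance (grid : List (List Int)) (x : Int) (y : Int) (set_of_flashed : List (Int × Int)) : Decidable (Pre_flash_octo grid x y set_of_flashed) := by unfold Pre_flash_octo; infer_instance

def pvWitness_flash_octo : List (List Int) × Int × Int × (List (Int × Int)) :=
  ([[10, 1], [3, 4]], 0, 0, [(1, 1)])

def Spec_flash_octo (grid : List (List Int)) (x : Int) (y : Int) (set_of_flashed : List (Int × Int)) (out : Int) : Prop := out = flash_octo_alt grid x y set_of_flashed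
instance (grid : List (List Int)) (x : Int) (y : Int) (set_of_flashed : List (Int × Int)) (out : Int) : Decidable (Spec_flash_octo grid x y set_of_flashed out) := by unfold Spec_flash_octo; infer_instance

-- ===== CLAIM (what is proved, stated in full; the proofs are below) =====
def Claim_equal_flash_octo : Prop := ∀ (grid : List (List Int)) (x : Int) (y : Int) (set_of_flashed : List (Int × Int)), Dom_flash_octo grid x y set_of_flashed → Pre_flash_octo grid x y set_of_flashed → Spec_flash_octo grid x y set_of_flashed (flash_octo grid x y set_of_flashed)

-- ===== LEMMAS AND PROOFS =====

-- cells with integer coordinates inside the n × n grid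
def pvIn (n : Nat) (c : Int × Int) : Prop :=
  0 ≤ c.1 ∧ c.1 < n ∧ 0 ≤ c.2 ∧ c.2 < n

-- number of in-grid cells not yet flashed (the fuel measure)
def pvAvail (n : Nat) (s : List (Int × Int)) : Nat :=
  ((Finset.range n ×ˢ Finset.range n).filter
    (fun p => ((p.1 : Int), (p.2 : Int)) ∉ s)).card

lemma pvAvail_le (n : Nat) (s : List (Int × Int)) : pvAvail n s ≤ n * n := by
  calc pvAvail n s ≤ (Finset.range n ×ˢ Finset.range n).card := Finset.card_filter_le _ _
    _ = n * n := by simp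

lemma pvAvail_append_le (n : Nat) (s t : List (Int × Int)) :
    pvAvail n (s ++ t) ≤ pvAvail n s := by
  apply Finset.card_le_card
  intro p hp
  simp only [Finset.mem_filter, List.mem_append] at *
  tauto

lemma pvAvail_append_singleton (n : Nat) (s : List (Int × Int)) (c : Int × Int)
    (hin : pvIn n c) (hmem : c ∉ s) :
    pvAvail n (s ++ [c]) + 1 = pvAvail n s := by
  obtain ⟨h1, h2, h3, h4⟩ := hin
  have hcmem : (c.1.toNat, c.2.toNat) ∈
      (Finset.range n ×ˢ Finset.range n).filter (fun p => ((p.1 : Int), (p.2 : Int)) ∉ s) := by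
    simp only [Finset.mem_filter, Finset.mem_product, Finset.mem_range]
    refine ⟨⟨by omega, by omega⟩, ?_⟩
    rwa [Int.toNat_of_nonneg h1, Int.toNat_of_nonneg h3, Prod.mk.eta]
  have hset : (Finset.range n ×ˢ Finset.range n).filter
        (fun p => ((p.1 : Int), (p.2 : Int)) ∉ s ++ [c]) =
      ((Finset.range n ×ˢ Finset.range n).filter
        (fun p => ((p.1 : Int), (p.2 : Int)) ∉ s)).erase (c.1.toNat, c.2.toNat) := by
    ext q
    simp only [Finset.mem_erase, Finset.mem_filter, List.mem_append, List.mem_singleton,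
      Finset.mem_product, Finset.mem_range, not_or, Prod.ext_iff]
    constructor
    · rintro ⟨hq, hs, hc⟩
      refine ⟨fun hh => hc ?_, hq, hs⟩
      obtain ⟨e1, e2⟩ := hh
      exact ⟨by omega, by omega⟩
    · rintro ⟨hne, hq, hs⟩
      refine ⟨hq, hs, fun hh => hne ?_⟩
      obtain ⟨e1, e2⟩ := hh
      rw [Prod.ext_iff]
      exact ⟨by omega, by omega⟩
  have hpos : 1 ≤ ((Finset.range n ×ˢ Finset.range n).filter
      (fun p => ((p.1 : Int), (p.2 : Int)) ∉ s)).card :=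
    Finset.card_pos.mpr ⟨_, hcmem⟩
  have := Finset.card_erase_of_mem hcmem
  unfold pvAvail
  rw [hset, this]
  omega

lemma pvNbrs_in (n : Nat) (x y : Int) (hn : 1 ≤ n) (hx : 0 ≤ x) (hx' : x < n)
    (hy : 0 ≤ y) (hy' : y < n) :
    ∀ c ∈ pvNbrs x y ((n : Int) - 1), pvIn n c := by
  intro c hc
  have := (PySem.List.mem_dedup _ _).mp hc
  simp only [List.mem_cons, List.not_mem_nil, or_false] at this
  rcases this with rfl|rfl|rfl|rfl|rfl|rfl|rfl|rfl <;>
    exact ⟨by omega, by omega, by omega, by omega⟩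

lemma length_pvSetCell (g : List (List Int)) (y x v : Int) :
    (pvSetCell g y x v).length = g.length := by
  simp [pvSetCell]

lemma contains_eq_mem (s : List (Int × Int)) (c : Int × Int) :
    PySem.Set.contains s c = decide (c ∈ s) := by
  simp [PySem.Set.contains]

lemma set_add_eq_append (s : List (Int × Int)) (c : Int × Int) (h : c ∉ s) :
    PySem.Set.add s c = s ++ [c] := by
  simp [PySem.Set.add, PySem.Set.contains, h]

-- sufficiency of the fuel: with fuel > pvAvail n s both mutual functions succeed,
-- the flash count equals the number of newly flashed cells, the grid keeps its
-- length, and pvAvail drops by exactly that number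
lemma pvSuff (fuel : Nat) :
    (∀ n g x y s, g.length = n → pvIn n (x, y) → pvAvail n s < fuel →
      ∃ new g', pvFlashA fuel g x y s = some ((new.length : Int), g', s ++ new) ∧
        g'.length = n ∧ pvAvail n (s ++ new) + new.length = pvAvail n s) ∧
    (∀ n cells fl g s, g.length = n → (∀ c ∈ cells, pvIn n c) → pvAvail n s < fuel →
      ∃ new g', pvLoopA fuel cells fl g s = some (fl + (new.length : Int), g', s ++ new) ∧
        g'.length = n ∧ pvAvail n (s ++ new) + new.length = pvAvail n s) := by
  induction fuel with
  | zero =>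
    exact ⟨fun n g x y s _ _ hav => absurd hav (Nat.not_lt_zero _),
           fun n cells fl g s _ _ hav => absurd hav (Nat.not_lt_zero _)⟩
  | succ f ih =>
    have hflash : ∀ n g x y s, g.length = n → pvIn n (x, y) → pvAvail n s < f + 1 →
        ∃ new g', pvFlashA (f+1) g x y s = some ((new.length : Int), g', s ++ new) ∧
          g'.length = n ∧ pvAvail n (s ++ new) + new.length = pvAvail n s := by
      intro n g x y s hg hin hav
      by_cases h9 : pvCell g y x > 9
      · by_cases hmem : (x, y) ∈ s
        · refine ⟨[], g, ?_, hg, by simp⟩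
          rw [pvFlashA]
          simp [h9, hmem]
        · have hs1 : PySem.Set.add s (x, y) = s ++ [(x, y)] := set_add_eq_append _ _ hmem
          have hav1 : pvAvail n (s ++ [(x, y)]) + 1 = pvAvail n s :=
            pvAvail_append_singleton n s (x, y) hin hmem
          obtain ⟨h1, h2, h3, h4⟩ := hin
          obtain ⟨new, g', hEq, hlen, havEq⟩ :=
            ih.2 n (pvNbrs x y ((n : Int) - 1)) 1 (pvSetCell g y x 0) (s ++ [(x, y)])
              (by rw [length_pvSetCell]; exact hg)
              (pvNbrs_in n x y (by omega) h1 h2 h3 h4)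
              (by omega)
          refine ⟨(x, y) :: new, g', ?_, hlen, ?_⟩
          · rw [pvFlashA]
            simp only [h9, contains_eq_mem, hmem, decide_true, decide_false,
              Bool.not_false, Bool.and_self, if_pos]
            rw [hs1, hg, hEq]
            congr 1
            refine Prod.ext ?_ (Prod.ext ?_ ?_) <;> simp [List.append_assoc]
            omega
          · rw [show s ++ (x, y) :: new = (s ++ [(x, y)]) ++ new by simp]
            simp only [List.length_cons]
            omega
      · refine ⟨[], g, ?_, hg, by simp⟩
        rw [pvFlashA]
        simp [h9]
    refine ⟨hflash, ?_⟩
    intro n cells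
    induction cells with
    | nil =>
      intro fl g s hg _ _
      exact ⟨[], g, by rw [pvLoopA]; simp, hg, by simp⟩
    | cons c rest ihr =>
      intro fl g s hg hcells hav
      by_cases hc : c ∈ s
      · obtain ⟨new, g', hEq, hlen, havEq⟩ :=
          ihr fl g s hg (fun d hd => hcells d (List.mem_cons_of_mem _ hd)) hav
        refine ⟨new, g', ?_, hlen, havEq⟩
        rw [pvLoopA]
        simp [hc, hEq]
      · have hcin : pvIn n (c.1, c.2) := by
          have := hcells c (List.mem_cons_self ..)
          simpa using this
        obtain ⟨new2, g2, hF, hlen2, hav2⟩ :=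
          hflash n (pvSetCell g c.2 c.1 (pvCell g c.2 c.1 + 1)) c.1 c.2 s
            (by rw [length_pvSetCell]; exact hg) hcin hav
        obtain ⟨new3, g3, hL, hlen3, hav3⟩ :=
          ihr (fl + (new2.length : Int)) g2 (s ++ new2) hlen2
            (fun d hd => hcells d (List.mem_cons_of_mem _ hd))
            (by have := pvAvail_append_le n s new2; omega)
        refine ⟨new2 ++ new3, g3, ?_, hlen3, ?_⟩
        · rw [pvLoopA]
          simp only [contains_eq_mem, hc, decide_false, Bool.not_false, if_pos]
          rw [hF]
          dsimp only
          rw [hL]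
          congr 1
          refine Prod.ext ?_ (Prod.ext ?_ ?_) <;> simp [List.append_assoc]
          omega
        · rw [show s ++ (new2 ++ new3) = (s ++ new2) ++ new3 by simp]
          simp only [List.length_append]
          omega

-- correspondence: A's loop over an agenda equals B's machine consuming that agenda
lemma pvCorr (fuel : Nat) :
    ∀ cells fl g s fl' g' s', pvLoopA fuel cells fl g s = some (fl', g', s') →
      ∃ k : Nat, fl' = fl + k ∧
        ∀ (F : Nat) (rest : List (List (Int × Int))) (acc : Int),
          pvRunB (F + k) (cells :: rest) acc g s = pvRunB F rest (acc + k) g' s' := by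
  induction fuel with
  | zero =>
    intro cells
    induction cells with
    | nil =>
      intro fl g s fl' g' s' hEq
      rw [pvLoopA] at hEq
      simp only [Option.some.injEq, Prod.mk.injEq] at hEq
      obtain ⟨rfl, rfl, rfl⟩ := hEq
      refine ⟨0, by simp, ?_⟩
      intro F rest₀ acc
      rw [pvRunB]
      simp
    | cons c rest ihr =>
      intro fl g s fl' g' s' hEq
      rw [pvLoopA] at hEq
      by_cases hc : c ∈ s
      · simp only [contains_eq_mem, hc, decide_true, Bool.not_true, Bool.false_eq_true,
          if_false] at hEq
        obtain ⟨k, hk, hRun⟩ := ihr fl g s fl' g' s' hEq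
        refine ⟨k, hk, ?_⟩
        intro F rest₀ acc
        rw [pvRunB]
        simp only [contains_eq_mem, hc, decide_true, Bool.not_true, Bool.false_eq_true,
          if_false]
        exact hRun F rest₀ acc
      · simp only [contains_eq_mem, hc, decide_false, Bool.not_false, if_true,
          pvFlashA] at hEq
        exact absurd hEq (by simp)
  | succ f ihf =>
    intro cells
    induction cells with
    | nil =>
      intro fl g s fl' g' s' hEq
      rw [pvLoopA] at hEq
      simp only [Option.some.injEq, Prod.mk.injEq] at hEq
      obtain ⟨rfl, rfl, rfl⟩ := hEq
      refine ⟨0, by simp, ?_⟩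
      intro F rest₀ acc
      rw [pvRunB]
      simp
    | cons c rest ihr =>
      intro fl g s fl' g' s' hEq
      rw [pvLoopA] at hEq
      by_cases hc : c ∈ s
      · simp only [contains_eq_mem, hc, decide_true, Bool.not_true, Bool.false_eq_true,
          if_false] at hEq
        obtain ⟨k, hk, hRun⟩ := ihr fl g s fl' g' s' hEq
        refine ⟨k, hk, ?_⟩
        intro F rest₀ acc
        rw [pvRunB]
        simp only [contains_eq_mem, hc, decide_true, Bool.not_true, Bool.false_eq_true,
          if_false]
        exact hRun F rest₀ acc
      · simp only [contains_eq_mem, hc, decide_false, Bool.not_false, if_true] at hEq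
        rcases hFA : pvFlashA (f+1) (pvSetCell g c.2 c.1 (pvCell g c.2 c.1 + 1)) c.1 c.2 s with
          _ | ⟨f2, g2, s2⟩
        · rw [hFA] at hEq
          exact absurd hEq (by simp)
        · rw [hFA] at hEq
          dsimp only at hEq
          rw [pvFlashA] at hFA
          by_cases h9 : pvCell (pvSetCell g c.2 c.1 (pvCell g c.2 c.1 + 1)) c.2 c.1 > 9
          · simp only [h9, contains_eq_mem, hc, Prod.mk.eta, decide_true, decide_false,
              Bool.not_false, Bool.and_self, if_true] at hFA
            obtain ⟨k2, hf2, hRun2⟩ := ihf _ _ _ _ _ _ _ hFA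
            obtain ⟨k3, hf3, hRun3⟩ := ihr _ _ _ _ _ _ hEq
            refine ⟨1 + k2 + k3, by omega, ?_⟩
            intro F rest₀ acc
            have hfe : F + (1 + k2 + k3) = ((F + k3) + k2) + 1 := by omega
            rw [pvRunB, hfe]
            simp only [contains_eq_mem, hc, decide_false, Bool.not_false, if_true, h9]
            rw [hRun2 (F + k3) (rest :: rest₀) (acc + 1), hRun3 F rest₀ (acc + 1 + (k2 : Int))]
            congr 1
            push_cast
            ring
          · simp only [h9, decide_false, Bool.false_and] at hFA
            obtain ⟨rfl, rfl, rfl⟩ := hFA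
            obtain ⟨k3, hf3, hRun3⟩ := ihr _ _ _ _ _ _ hEq
            refine ⟨k3, by omega, ?_⟩
            intro F rest₀ acc
            rw [pvRunB]
            simp only [contains_eq_mem, hc, decide_false, Bool.not_false, if_true, h9]
            exact hRun3 F rest₀ acc

-- ===== VERDICT (by name: the statement is the Claim_ definition above) =====
theorem flash_octo_spec : Claim_equal_flash_octo := by
  intro grid x y s _ hPre
  obtain ⟨hyr, hxr, hrest⟩ := hPre
  unfold Spec_flash_octo flash_octo flash_octo_alt
  by_cases h9 : pvCell grid y x > 9
  · by_cases hmem : (x, y) ∈ s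
    · rw [pvFlashA]
      simp [h9, hmem]
    · obtain ⟨hn, hsq, hx0, hy0⟩ : 1 ≤ grid.length ∧
          (∀ row ∈ grid, row.length = grid.length) ∧ 0 ≤ x ∧ 0 ≤ y := by
        rcases hrest with h | h | h
        · omega
        · exact absurd h hmem
        · exact h
      have hy1 : y < grid.length := hyr.2
      have hx1 : x < grid.length := by
        have hrow : PySem.List.pyGetD grid y [] ∈ grid :=
          PySem.List.pyGetD_mem grid [] hyr
        have := hsq _ hrow
        have := hxr.2
        omega
      have hs1eq : PySem.Set.add s (x, y) = s ++ [(x, y)] := set_add_eq_append _ _ hmem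
      have hav1 : pvAvail grid.length (s ++ [(x, y)]) + 1 = pvAvail grid.length s :=
        pvAvail_append_singleton _ _ _ ⟨hx0, hx1, hy0, hy1⟩ hmem
      have havle : pvAvail grid.length s ≤ grid.length * grid.length := pvAvail_le _ _
      obtain ⟨new, g', hL, hlen, havEq⟩ :=
        (pvSuff (grid.length * grid.length)).2 grid.length
          (pvNbrs x y ((grid.length : Int) - 1)) 1 (pvSetCell grid y x 0) (s ++ [(x, y)])
          (length_pvSetCell ..)
          (pvNbrs_in grid.length x y (by omega) hx0 hx1 hy0 hy1)
          (by omega)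
      obtain ⟨k2, hk2, hRun⟩ := pvCorr (grid.length * grid.length) _ _ _ _ _ _ _ hL
      have hknew : k2 = new.length := by omega
      have hkle : k2 ≤ grid.length * grid.length := by omega
      have hFk : grid.length * grid.length + 1 =
          (grid.length * grid.length + 1 - k2) + k2 := by omega
      rw [pvFlashA]
      simp only [h9, contains_eq_mem, hmem, decide_true, decide_false, Bool.not_false,
        Bool.and_self, if_true]
      rw [hs1eq, hL, hFk, hRun (grid.length * grid.length + 1 - k2) [] 1, pvRunB]
      exact hk2
  · rw [pvFlashA]
    simp [h9]
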